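-- pv_equiv track=rewrite | github.com/syzsky/LCA | ui/panels/widget/parameter_panel_widget_table_selector_hint_variable_sources_mixin.py | _parse_variable_sources_text
-- ===== SOURCE A (Python) =====
-- def _parse_variable_sources_text(text: str) -> list:
--     names = []
--     for part in text.replace(';', ',').replace('|', ',').split(','):
--         chunk = part.strip()
--         if not chunk:
--             continue
--         for line in chunk.splitlines():
--             name = line.strip()
--             if name:
--                 names.append(name)
--     return names
-- ===== SOURCE B (Python) =====
-- def _parse_variable_sources_text(text: str) -> list:
--     names = []
--     current = []
--     def flush():
--         token = ''.join(current).strip()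
--         if token:
--             names.append(token)
--         current.clear()
--     for ch in text:
--         if ch in ',;|\r\n':
--             flush()
--         else:
--             current.append(ch)
--     flush()
--     return names
-- ===== Notes on version B (the rewrite author's own statement) =====
-- stated objective: alternative
-- what changed: Replaced the chained replace/split plus nested splitlines loops by one character-at-a-time scan that cuts tokens at any of , ; | CR LF, stripping and keeping each non-empty piece.
import Mathlib
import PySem

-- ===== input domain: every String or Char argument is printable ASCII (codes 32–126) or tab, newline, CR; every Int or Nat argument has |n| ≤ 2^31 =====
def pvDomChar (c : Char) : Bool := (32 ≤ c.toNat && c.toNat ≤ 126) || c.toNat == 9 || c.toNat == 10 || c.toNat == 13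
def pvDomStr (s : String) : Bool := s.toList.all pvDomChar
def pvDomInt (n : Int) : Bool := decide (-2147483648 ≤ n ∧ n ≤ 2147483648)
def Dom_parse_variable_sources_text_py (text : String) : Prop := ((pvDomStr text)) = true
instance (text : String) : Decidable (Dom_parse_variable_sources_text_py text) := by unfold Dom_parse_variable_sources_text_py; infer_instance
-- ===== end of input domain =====

-- B replaces A's chained replace/split plus nested splitlines loops by a single left-to-right
-- character scan that cuts tokens at , ; | CR LF (alternative decomposition, same linear cost).

-- ===== PORT A =====
-- Port of A; strings are handled as List Char via the PySem.Chars primitives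
-- (each PySem.Str.* is a thin wrapper over the PySem.Chars.* used here), String.ofList at output.
def parse_variable_sources_text_py (text : String) : List String :=
  (PySem.Chars.splitOn
      (PySem.Chars.replace (PySem.Chars.replace text.toList [';'] [',']) ['|'] [','])
      [',']).foldl
    (fun names part =>
      let chunk := PySem.Chars.strip part
      if chunk.isEmpty then names
      else
        (PySem.Chars.splitlines chunk).foldl
          (fun names line =>
            let name := PySem.Chars.strip line
            if name.isEmpty then names else names ++ [String.ofList name])
          names)
    []

-- ===== PORT B =====
def pvIsDelim (c : Char) : Bool := c == ',' || c == ';' || c == '|' || c == '\r' || c == '\n'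

-- flush(): strip the pending chunk, append it to names if non-empty
def pvFlush (names : List String) (current : List Char) : List String :=
  let token := PySem.Chars.strip current
  if token.isEmpty then names else names ++ [String.ofList token]

def parse_variable_sources_text_py_alt (text : String) : List String :=
  let st := text.toList.foldl
    (fun (st : List String × List Char) ch =>
      if pvIsDelim ch then (pvFlush st.1 st.2, []) else (st.1, st.2 ++ [ch]))
    ([], [])
  pvFlush st.1 st.2

-- ===== PRECONDITION & SPEC =====
def Spec_parse_variable_sources_text_py (text : String) (out : List String) : Prop := out = parse_variable_sources_text_py_alt text
instance (text : String) (out : List String) : Decidable (Spec_parse_variable_sources_text_py text out) := by unfold Spec_parse_variable_sources_text_py; infer_instance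

-- ===== CLAIM (what is proved, stated in full; the proofs are below) =====
def Claim_equal_parse_variable_sources_text_py : Prop := ∀ (text : String), Dom_parse_variable_sources_text_py text → Spec_parse_variable_sources_text_py text (parse_variable_sources_text_py text)

-- ===== LEMMAS AND PROOFS =====

def pvIsNL (c : Char) : Bool := c == '\n' || c == '\r'
def pvIsC (c : Char) : Bool := c == ',' || c == ';' || c == '|'
def pvRep (c : Char) : Char := if c == ';' || c == '|' then ',' else c

-- the common reference value: split on a delimiter predicate, strip, drop empties
def pvToks (p : Char → Bool) (cs : List Char) : List (List Char) :=
  ((cs.splitOnP p).map PySem.Chars.strip).filter (fun t => !t.isEmpty)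

def pvTokens (p : Char → Bool) (cs : List Char) : List String :=
  (pvToks p cs).map String.ofList

-- the line-boundary test inside PySem.Chars.splitlines, as a named function
def pvIsB (c : Char) : Bool :=
  decide (c.toNat = 10) || decide (c.toNat = 13) || decide (c.toNat = 11) || decide (c.toNat = 12) ||
  decide (c.toNat = 28) || decide (c.toNat = 29) || decide (c.toNat = 30) || decide (c.toNat = 133) ||
  decide (c.toNat = 8232) || decide (c.toNat = 8233)

-- splitlines' line list, forward-accumulating (go's cur is kept reversed)
def pvLines (isB : Char → Bool) : List Char → List Char → List (List Char)
  | cur, [] => if cur.isEmpty then [] else [cur]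
  | cur, '\r' :: '\n' :: rest => cur :: pvLines isB [] rest
  | cur, c :: rest => if isB c then cur :: pvLines isB [] rest else pvLines isB (cur ++ [c]) rest

-- ---- generic splitOnP facts ----
theorem pv_splitOnP_nodelim_append (p : Char → Bool) (pre l : List Char)
    (h : ∀ c ∈ pre, p c = false) :
    (pre ++ l).splitOnP p = (l.splitOnP p).modifyHead (pre ++ ·) := by
  induction pre with
  | nil =>
    rcases hsp : l.splitOnP p with _ | ⟨s, ss⟩
    · exact absurd hsp (List.splitOnP_ne_nil p l)
    · simp [List.modifyHead, hsp]
  | cons c t ih =>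
    have hc : p c = false := h c (by simp)
    have ht : ∀ x ∈ t, p x = false := fun x hx => h x (by simp [hx])
    rcases hsp : l.splitOnP p with _ | ⟨s, ss⟩
    · exact absurd hsp (List.splitOnP_ne_nil p l)
    · have hih := ih ht
      rw [hsp] at hih
      rcases hsp2 : (t ++ l).splitOnP p with _ | ⟨u, uu⟩
      · exact absurd hsp2 (List.splitOnP_ne_nil p (t ++ l))
      · rw [hsp2] at hih
        simp only [List.modifyHead] at hih
        obtain ⟨hu, huu⟩ := List.cons.inj hih
        rw [List.cons_append, List.splitOnP_cons, hc]
        simp only [Bool.false_eq_true, if_false, hsp2, List.modifyHead, hsp]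
        subst hu huu
        simp

theorem pv_splitOnP_nodelim (p : Char → Bool) (cs : List Char)
    (h : ∀ c ∈ cs, p c = false) : cs.splitOnP p = [cs] := by
  have := pv_splitOnP_nodelim_append p cs [] h
  simpa using this

theorem pv_splitOnP_delim_cons (p : Char → Bool) (pre l : List Char) (d : Char)
    (hpre : ∀ c ∈ pre, p c = false) (hd : p d = true) :
    (pre ++ d :: l).splitOnP p = pre :: l.splitOnP p := by
  rw [pv_splitOnP_nodelim_append p pre _ hpre, List.splitOnP_cons, if_pos hd]
  simp

theorem pv_splitOnP_map (f : Char → Char) (p : Char → Bool) (cs : List Char) :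
    (cs.map f).splitOnP p = (cs.splitOnP (fun c => p (f c))).map (List.map f) := by
  induction cs with
  | nil => simp
  | cons c t ih =>
    by_cases hc : p (f c)
    · simp [List.splitOnP_cons, hc, ih]
    · rcases hsp : t.splitOnP (fun c => p (f c)) with _ | ⟨s, ss⟩
      · exact absurd hsp (List.splitOnP_ne_nil _ t)
      · simp [List.splitOnP_cons, hc, ih, hsp]

theorem pv_splitOnP_or (p q : Char → Bool) (cs : List Char) :
    cs.splitOnP (fun c => p c || q c) = (cs.splitOnP p).flatMap (fun s => s.splitOnP q) := by
  induction cs with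
  | nil => simp
  | cons c t ih =>
    rcases hsp : t.splitOnP p with _ | ⟨s, ss⟩
    · exact absurd hsp (List.splitOnP_ne_nil p t)
    · by_cases hp : p c
      · simp [List.splitOnP_cons, hp, ih]
      · by_cases hq : q c
        · simp [List.splitOnP_cons, hp, hq, ih, hsp]
        · rcases hsq : s.splitOnP q with _ | ⟨u, uu⟩
          · exact absurd hsq (List.splitOnP_ne_nil q s)
          · simp [List.splitOnP_cons, hp, hq, ih, hsp, hsq]

theorem pv_mem_splitOnP (p : Char → Bool) (cs : List Char) :
    ∀ s ∈ cs.splitOnP p, ∀ c ∈ s, p c = false ∧ c ∈ cs := by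
  induction cs with
  | nil => intro s hs c hc; simp at hs; subst hs; simp at hc
  | cons a t ih =>
    intro s hs c hc
    by_cases ha : p a
    · rw [List.splitOnP_cons, if_pos ha, List.mem_cons] at hs
      rcases hs with hs | hs
      · subst hs; simp at hc
      · have := ih s hs c hc
        exact ⟨this.1, by simp [this.2]⟩
    · rw [List.splitOnP_cons, if_neg ha] at hs
      rcases hsp : t.splitOnP p with _ | ⟨u, uu⟩
      · exact absurd hsp (List.splitOnP_ne_nil p t)
      · rw [hsp] at hs
        simp only [List.modifyHead, List.mem_cons] at hs
        rcases hs with hs | hs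
        · subst hs
          rw [List.mem_cons] at hc
          rcases hc with hc | hc
          · exact ⟨by simpa [hc] using ha, by simp [hc]⟩
          · have := ih u (by simp [hsp]) c hc
            exact ⟨this.1, by simp [this.2]⟩
        · have := ih s (by simp [hsp, hs]) c hc
          exact ⟨this.1, by simp [this.2]⟩

theorem pv_splitOnP_delim_concat (p : Char → Bool) (xs : List Char) (d : Char) (hd : p d = true) :
    (xs ++ [d]).splitOnP p = xs.splitOnP p ++ [[]] := by
  induction xs with
  | nil => simp [List.splitOnP_cons, hd]
  | cons a t ih =>
    by_cases ha : p a
    · simp [List.splitOnP_cons, ha, ih]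
    · rcases hsp : t.splitOnP p with _ | ⟨s, ss⟩
      · exact absurd hsp (List.splitOnP_ne_nil p t)
      · have : (t ++ [d]).splitOnP p = s :: (ss ++ [[]]) := by rw [ih, hsp]; simp
        simp [List.splitOnP_cons, ha, this, hsp]

theorem pv_splitOnP_nondelim_concat (p : Char → Bool) (c : Char) (hc : p c = false) :
    ∀ (xs : List Char) (init : List (List Char)) (lastp : List Char),
      xs.splitOnP p = init ++ [lastp] →
      (xs ++ [c]).splitOnP p = init ++ [lastp ++ [c]] := by
  intro xs
  induction xs with
  | nil =>
    intro init lastp h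
    rcases init with _ | ⟨i0, init'⟩
    · simp only [List.splitOnP_nil, List.nil_append] at h
      obtain ⟨h1, -⟩ := List.cons.inj h
      subst h1
      simp [List.splitOnP_cons, hc, List.modifyHead]
    · exfalso
      simp only [List.splitOnP_nil] at h
      obtain ⟨-, h2⟩ := List.cons.inj h
      exact (List.append_ne_nil_of_right_ne_nil init' (by simp) h2.symm)
  | cons a t ih =>
    intro init lastp h
    by_cases ha : p a
    · rw [List.splitOnP_cons, if_pos ha] at h
      rcases init with _ | ⟨i0, init'⟩
      · exfalso
        rw [List.nil_append] at h
        obtain ⟨-, h2⟩ := List.cons.inj h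
        exact List.splitOnP_ne_nil p t h2
      · rw [List.cons_append] at h
        obtain ⟨h1, h2⟩ := List.cons.inj h
        subst h1
        have := ih init' lastp h2
        rw [List.cons_append, List.splitOnP_cons, if_pos ha, this]
        simp
    · rw [List.splitOnP_cons, if_neg ha] at h
      rcases hsp : t.splitOnP p with _ | ⟨s, ss⟩
      · exact absurd hsp (List.splitOnP_ne_nil p t)
      · rw [hsp] at h
        simp only [List.modifyHead] at h
        rcases init with _ | ⟨i0, init'⟩
        · rw [List.nil_append] at h
          obtain ⟨h1, h2⟩ := List.cons.inj h
          have := ih [] s (by rw [hsp, h2]; rfl)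
          rw [List.cons_append, List.splitOnP_cons, if_neg ha, this]
          simp [← h1, List.modifyHead]
        · rw [List.cons_append] at h
          obtain ⟨h1, h2⟩ := List.cons.inj h
          have := ih (s :: init') lastp (by rw [hsp, h2]; simp)
          rw [List.cons_append, List.splitOnP_cons, if_neg ha, this]
          simp [← h1, List.modifyHead]

-- ---- strip facts ----
theorem pv_strip_cons_space (c : Char) (t : List Char) (h : PySem.Chars.isspace c = true) :
    PySem.Chars.strip (c :: t) = PySem.Chars.strip t := by
  simp [PySem.Chars.strip, PySem.Chars.lstrip, List.dropWhile_cons, h]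

theorem pv_strip_concat_space (c : Char) (t : List Char) (h : PySem.Chars.isspace c = true) :
    PySem.Chars.strip (t ++ [c]) = PySem.Chars.strip t := by
  have hr : ∀ (l : List Char), PySem.Chars.rstrip (l ++ [c]) = PySem.Chars.rstrip l := by
    intro l
    simp [PySem.Chars.rstrip, List.dropWhile_cons, h]
  -- strip = rstrip ∘ lstrip; lstrip (t ++ [c]) is either lstrip t ++ [c] or a suffix of [c]
  rcases hlt : PySem.Chars.lstrip t with _ | ⟨x, xs⟩
  · -- t is all whitespace
    have : PySem.Chars.lstrip (t ++ [c]) = [] := by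
      simp only [PySem.Chars.lstrip] at hlt ⊢
      rw [List.dropWhile_append, hlt]
      simp [List.dropWhile_cons, h]
    simp [PySem.Chars.strip, this, hlt, PySem.Chars.rstrip]
  · have : PySem.Chars.lstrip (t ++ [c]) = PySem.Chars.lstrip t ++ [c] := by
      simp only [PySem.Chars.lstrip] at hlt ⊢
      rw [List.dropWhile_append, hlt]
      simp
    simp only [PySem.Chars.strip, this, hr]

theorem pv_mem_strip (c : Char) (l : List Char) (h : c ∈ PySem.Chars.strip l) : c ∈ l := by
  have h1 : PySem.Chars.strip l = PySem.Chars.rstrip (PySem.Chars.lstrip l) := rfl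
  rw [h1] at h
  have h2 : c ∈ PySem.Chars.lstrip l := by
    simp only [PySem.Chars.rstrip] at h
    rw [List.mem_reverse] at h
    have := (List.dropWhile_sublist (l := (PySem.Chars.lstrip l).reverse)
      (p := PySem.Chars.isspace)).mem h
    simpa using this
  exact (List.dropWhile_sublist (l := l) (p := PySem.Chars.isspace)).mem h2

-- ---- pvToks facts ----
theorem pv_toks_cons_delim (p : Char → Bool) (c : Char) (t : List Char) (hp : p c = true) :
    pvToks p (c :: t) = pvToks p t := by
  simp [pvToks, List.splitOnP_cons, hp, PySem.Chars.strip, PySem.Chars.lstrip, PySem.Chars.rstrip]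

theorem pv_toks_cons_space (p : Char → Bool) (c : Char) (t : List Char)
    (hs : PySem.Chars.isspace c = true) :
    pvToks p (c :: t) = pvToks p t := by
  by_cases hp : p c
  · exact pv_toks_cons_delim p c t hp
  · rcases hsp : t.splitOnP p with _ | ⟨s, ss⟩
    · exact absurd hsp (List.splitOnP_ne_nil p t)
    · simp [pvToks, List.splitOnP_cons, hp, hsp, pv_strip_cons_space c s hs]

theorem pv_toks_concat_space (p : Char → Bool) (c : Char) (t : List Char)
    (hs : PySem.Chars.isspace c = true) :
    pvToks p (t ++ [c]) = pvToks p t := by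
  by_cases hp : p c
  · simp [pvToks, pv_splitOnP_delim_concat p t c hp, PySem.Chars.strip,
      PySem.Chars.lstrip, PySem.Chars.rstrip]
  · obtain ⟨init, lastp, heq⟩ := (t.splitOnP p).eq_nil_or_concat.resolve_left
      (List.splitOnP_ne_nil p t)
    rw [List.concat_eq_append] at heq
    rw [pvToks, pv_splitOnP_nondelim_concat p c (by simpa using hp) t init lastp heq,
      pvToks, heq]
    simp [pv_strip_concat_space c lastp hs]

theorem pv_toks_lstrip (p : Char → Bool) (cs : List Char) :
    pvToks p (PySem.Chars.lstrip cs) = pvToks p cs := by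
  induction cs with
  | nil => rfl
  | cons c t ih =>
    by_cases hs : PySem.Chars.isspace c
    · rw [pv_toks_cons_space p c t hs, ← ih]
      simp [PySem.Chars.lstrip, List.dropWhile_cons, hs]
    · simp [PySem.Chars.lstrip, List.dropWhile_cons, hs]

theorem pv_toks_append_spaces (p : Char → Bool) (ws : List Char)
    (hws : ∀ c ∈ ws, PySem.Chars.isspace c = true) :
    ∀ t : List Char, pvToks p (t ++ ws) = pvToks p t := by
  induction ws with
  | nil => intro t; simp
  | cons w ws ih =>
    intro t
    have h1 : t ++ w :: ws = (t ++ [w]) ++ ws := by simp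
    rw [h1, ih (fun c hc => hws c (by simp [hc])) (t ++ [w]),
      pv_toks_concat_space p w t (hws w (by simp))]

theorem pv_toks_rstrip (p : Char → Bool) (cs : List Char) :
    pvToks p (PySem.Chars.rstrip cs) = pvToks p cs := by
  have hdecomp : cs = PySem.Chars.rstrip cs ++ (cs.reverse.takeWhile PySem.Chars.isspace).reverse := by
    simp only [PySem.Chars.rstrip]
    rw [← List.reverse_append, List.takeWhile_append_dropWhile, List.reverse_reverse]
  have hws : ∀ c ∈ (cs.reverse.takeWhile PySem.Chars.isspace).reverse, PySem.Chars.isspace c = true := by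
    intro c hc
    rw [List.mem_reverse] at hc
    exact List.mem_takeWhile_imp hc
  conv_rhs => rw [hdecomp]
  rw [pv_toks_append_spaces p _ hws]

theorem pv_toks_strip (p : Char → Bool) (cs : List Char) :
    pvToks p (PySem.Chars.strip cs) = pvToks p cs := by
  have : PySem.Chars.strip cs = PySem.Chars.rstrip (PySem.Chars.lstrip cs) := rfl
  rw [this, pv_toks_rstrip, pv_toks_lstrip]

theorem pv_char_eq_iff (c d : Char) : (c = d) ↔ c.toNat = d.toNat := by
  constructor
  · intro h; rw [h]
  · intro h
    have h1 : Char.ofNat c.toNat = Char.ofNat d.toNat := by rw [h]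
    rwa [Char.ofNat_toNat, Char.ofNat_toNat] at h1


-- ---- splitlines facts ----
theorem pvLines_nil (isB : Char → Bool) (cur : List Char) :
    pvLines isB cur [] = if cur.isEmpty then [] else [cur] := rfl

theorem pvLines_crlf (isB : Char → Bool) (cur rest : List Char) :
    pvLines isB cur ('\r' :: '\n' :: rest) = cur :: pvLines isB [] rest := rfl

theorem pvLines_cons2 (isB : Char → Bool) (cur : List Char) (c c2 : Char) (rest : List Char)
    (h : ¬ (c = '\r' ∧ c2 = '\n')) :
    pvLines isB cur (c :: c2 :: rest)
      = if isB c then cur :: pvLines isB [] (c2 :: rest)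
        else pvLines isB (cur ++ [c]) (c2 :: rest) := by
  rw [pvLines.eq_def]
  split
  · rename_i heq; simp at heq
  · rename_i heq
    obtain ⟨h1, h2⟩ := List.cons.inj heq
    obtain ⟨h3, -⟩ := List.cons.inj h2
    exact absurd ⟨h1, h3⟩ h
  · rename_i hne heq
    obtain ⟨h1, h2⟩ := List.cons.inj heq
    rw [h1, h2]

theorem pvLines_one (isB : Char → Bool) (cur : List Char) (c : Char) :
    pvLines isB cur [c]
      = if isB c then cur :: pvLines isB [] [] else pvLines isB (cur ++ [c]) [] := by
  rw [pvLines.eq_def]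
  split
  · rename_i heq; simp at heq
  · rename_i heq
    obtain ⟨-, h2⟩ := List.cons.inj heq
    simp at h2
  · rename_i hne heq
    obtain ⟨h1, h2⟩ := List.cons.inj heq
    rw [h1, h2]

theorem pvLines_cons (isB : Char → Bool) (cur : List Char) (c : Char) (rest : List Char)
    (h : ¬ (c = '\r' ∧ rest.head? = some '\n')) :
    pvLines isB cur (c :: rest)
      = if isB c then cur :: pvLines isB [] rest else pvLines isB (cur ++ [c]) rest := by
  rcases rest with _ | ⟨c2, rest2⟩
  · exact pvLines_one isB cur c
  · exact pvLines_cons2 isB cur c c2 rest2 (by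
      intro ⟨h1, h2⟩; exact h ⟨h1, by rw [h2]; rfl⟩)

theorem pv_go_cons (isB : Char → Bool) (c : Char) (rest cur : List Char)
    (acc : List (List Char)) (h : ¬ (c = '\r' ∧ rest.head? = some '\n')) :
    PySem.Chars.splitlines.go isB (c :: rest) cur acc
      = if isB c then PySem.Chars.splitlines.go isB rest [] (cur.reverse :: acc)
        else PySem.Chars.splitlines.go isB rest (c :: cur) acc := by
  rcases rest with _ | ⟨c2, rest2⟩
  · rw [PySem.Chars.splitlines.go.eq_def]
    split
    · rename_i heq; simp at heq
    · rename_i heq; simp at heq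
    · rename_i heq
      obtain ⟨h1, h2⟩ := List.cons.inj heq
      subst h1
      subst h2
      rfl
  · by_cases hc2 : c = '\r' ∧ c2 = '\n'
    · exact absurd ⟨hc2.1, by rw [hc2.2]; rfl⟩ h
    · rw [PySem.Chars.splitlines.go.eq_def]
      split
      · rename_i heq; simp at heq
      · rename_i heq
        obtain ⟨h1, h2⟩ := List.cons.inj heq
        obtain ⟨h3, -⟩ := List.cons.inj h2
        exact absurd ⟨h1, h3⟩ hc2
      · rename_i heq
        obtain ⟨h1, h2⟩ := List.cons.inj heq
        subst h1
        subst h2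
        rfl

theorem pv_splitlines_go_eq (isB : Char → Bool) :
    ∀ (n : Nat) (l cur : List Char) (acc : List (List Char)), l.length ≤ n →
      PySem.Chars.splitlines.go isB l cur acc = acc.reverse ++ pvLines isB cur.reverse l := by
  intro n
  induction n with
  | zero =>
    intro l cur acc h
    have hl : l = [] := by simpa using h
    subst hl
    rw [PySem.Chars.splitlines.go, pvLines_nil]
    by_cases hc : cur.isEmpty
    · have : cur = [] := by simpa using hc
      subst this; simp
    · have hne : cur ≠ [] := by simpa using hc
      simp [List.isEmpty_eq_false_iff.mpr hne, hne]
  | succ n ih =>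
    intro l cur acc h
    rcases l with _ | ⟨c, rest⟩
    · rw [PySem.Chars.splitlines.go, pvLines_nil]
      by_cases hc : cur.isEmpty
      · have : cur = [] := by simpa using hc
        subst this; simp
      · have hne : cur ≠ [] := by simpa using hc
        simp [List.isEmpty_eq_false_iff.mpr hne, hne]
    · by_cases hcr : c = '\r' ∧ rest.head? = some '\n'
      · obtain ⟨h1, hb⟩ := hcr
        subst h1
        rcases rest with _ | ⟨c2, rest2⟩
        · simp at hb
        · have h2 : c2 = '\n' := by simpa using hb
          subst h2
          rw [PySem.Chars.splitlines.go, pvLines_crlf,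
            ih rest2 [] (cur.reverse :: acc) (by simp at h ⊢; omega)]
          simp
      · rw [pv_go_cons isB c rest cur acc hcr, pvLines_cons isB cur.reverse c rest hcr]
        by_cases hb : isB c
        · rw [if_pos hb, if_pos hb,
            ih rest [] (cur.reverse :: acc) (by simp at h ⊢; omega)]
          simp
        · rw [if_neg hb, if_neg hb,
            ih rest (c :: cur) acc (by simp at h ⊢; omega)]
          simp

-- lines→splitOnP, post strip-filter, for boundary-agreeing inputs
theorem pv_lines_toks (isB : Char → Bool) :
    ∀ (n : Nat) (l cur : List Char), l.length ≤ n →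
      (∀ c ∈ l, isB c = pvIsNL c) → (∀ c ∈ cur, pvIsNL c = false) →
      (((pvLines isB cur l).map PySem.Chars.strip).filter (fun t => !t.isEmpty))
        = pvToks pvIsNL (cur ++ l) := by
  have hnil : ∀ cur : List Char, (∀ c ∈ cur, pvIsNL c = false) →
      (((pvLines isB cur []).map PySem.Chars.strip).filter (fun t => !t.isEmpty))
        = pvToks pvIsNL (cur ++ []) := by
    intro cur hcur
    rw [pvLines_nil, List.append_nil, pvToks, pv_splitOnP_nodelim pvIsNL cur hcur]
    by_cases hc : cur.isEmpty
    · have : cur = [] := by simpa using hc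
      subst this
      simp [PySem.Chars.strip, PySem.Chars.lstrip, PySem.Chars.rstrip]
    · simp [hc, List.filter]
  intro n
  induction n with
  | zero =>
    intro l cur h hl hcur
    have : l = [] := by simpa using h
    subst this
    exact hnil cur hcur
  | succ n ih =>
    intro l cur h hl hcur
    rcases l with _ | ⟨c, rest⟩
    · exact hnil cur hcur
    · by_cases hcr : c = '\r' ∧ rest.head? = some '\n'
      · obtain ⟨h1, hb⟩ := hcr
        subst h1
        rcases rest with _ | ⟨c2, rest2⟩
        · simp at hb
        · have h2 : c2 = '\n' := by simpa using hb
          subst h2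
          have hr : pvIsNL '\r' = true := by decide
          have hn : pvIsNL '\n' = true := by decide
          rw [pvLines_crlf, pvToks,
            pv_splitOnP_delim_cons pvIsNL cur ('\n' :: rest2) '\r' hcur hr,
            List.splitOnP_cons, if_pos hn]
          have ihx := ih rest2 [] (by simp at h ⊢; omega)
            (fun x hx => hl x (by simp [hx])) (by simp)
          simp only [List.nil_append, pvToks] at ihx
          simp only [List.map_cons, List.filter_cons, pvToks]
          rw [ihx]
          have hstripnil : ((PySem.Chars.strip ([] : List Char)).isEmpty) = true := by decide
          simp [hstripnil]
      · rw [pvLines_cons isB cur c rest hcr]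
        by_cases hb : isB c
        · have hcnl : pvIsNL c = true := by rw [← hl c (by simp)]; exact hb
          rw [if_pos hb, pvToks,
            pv_splitOnP_delim_cons pvIsNL cur rest c hcur hcnl]
          have ihx := ih rest [] (by simp at h ⊢; omega)
            (fun x hx => hl x (by simp [hx])) (by simp)
          simp only [List.nil_append, pvToks] at ihx
          simp only [List.map_cons, List.filter_cons, pvToks]
          rw [ihx]
        · have hcnl : pvIsNL c = false := by rw [← hl c (by simp)]; simpa using hb
          have hcur' : ∀ x ∈ cur ++ [c], pvIsNL x = false := by
            intro x hx
            rcases List.mem_append.mp hx with hx | hx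
            · exact hcur x hx
            · simp at hx; subst hx; exact hcnl
          rw [if_neg hb,
            ih rest (cur ++ [c]) (by simp at h ⊢; omega)
              (fun x hx => hl x (by simp [hx])) hcur']
          simp

theorem pv_splitlines_eq (cs : List Char) : PySem.Chars.splitlines cs = pvLines pvIsB [] cs := by
  have h0 : PySem.Chars.splitlines cs = PySem.Chars.splitlines.go pvIsB cs [] [] := rfl
  rw [h0, pv_splitlines_go_eq pvIsB cs.length cs [] [] le_rfl]
  rfl

theorem pv_isB_dom (c : Char) (h : pvDomChar c = true) : pvIsB c = pvIsNL c := by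
  have h10 : ('\n').toNat = 10 := rfl
  have h13 : ('\r').toNat = 13 := rfl
  have hh := h
  simp only [pvDomChar, Bool.or_eq_true, Bool.and_eq_true, decide_eq_true_eq,
    beq_iff_eq] at hh
  rw [Bool.eq_iff_iff]
  simp only [pvIsB, pvIsNL, Bool.or_eq_true, decide_eq_true_eq, beq_iff_eq, pv_char_eq_iff,
    h10, h13]
  omega

-- ---- fold shapes ----
theorem pv_inner_fold (L : List (List Char)) (names : List String) :
    L.foldl
      (fun names line =>
        let name := PySem.Chars.strip line
        if name.isEmpty then names else names ++ [String.ofList name])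
      names
    = names ++ ((L.map PySem.Chars.strip).filter (fun t => !t.isEmpty)).map String.ofList := by
  induction L generalizing names with
  | nil => simp
  | cons x xs ih =>
    rw [List.foldl_cons, ih]
    by_cases hx : (PySem.Chars.strip x).isEmpty
    · simp [hx, List.filter_cons]
    · simp [hx, List.filter_cons]

-- ---- single-character replace / split ----
theorem pv_replace_go_single (a b : Char) :
    ∀ (fuel : Nat) (l acc : List Char), l.length ≤ fuel →
      PySem.Chars.replace.go [a] [b] fuel l acc
        = acc.reverse ++ l.map (fun c => if c == a then b else c) := by
  intro fuel
  induction fuel with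
  | zero =>
    intro l acc h
    rw [PySem.Chars.replace.go]
    simp at h
    simp [h]
  | succ fuel ih =>
    intro l acc h
    cases l with
    | nil =>
      rw [PySem.Chars.replace.go]
      simp
      omega
    | cons c t =>
      rw [PySem.Chars.replace.go]
      by_cases hc : c = a
      · have hpre : [a].isPrefixOf (c :: t) = true := by simp [List.isPrefixOf, hc]
        rw [if_pos hpre]
        have := ih t ([b].reverse ++ acc) (by simpa using Nat.le_of_succ_le_succ h)
        simpa [hc] using this
      · have hpre : ¬ ([a].isPrefixOf (c :: t) = true) := by
          simp [List.isPrefixOf]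
          exact fun hca => hc hca.symm
        rw [if_neg hpre]
        have := ih t (c :: acc) (by simpa using Nat.le_of_succ_le_succ h)
        simp only [this]
        simp [hc]

theorem pv_replace_single (a b : Char) (cs : List Char) :
    PySem.Chars.replace cs [a] [b] = cs.map (fun c => if c == a then b else c) := by
  have : PySem.Chars.replace cs [a] [b] = PySem.Chars.replace.go [a] [b] cs.length cs [] := rfl
  rw [this, pv_replace_go_single a b cs.length cs [] le_rfl]
  simp

theorem pv_splitOn_go_single (a : Char) :
    ∀ (fuel : Nat) (l cur : List Char) (acc : List (List Char)), l.length < fuel →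
      PySem.Chars.splitOn.go [a] fuel l cur acc
        = acc.reverse ++ (l.splitOnP (fun c => c == a)).modifyHead (cur.reverse ++ ·) := by
  intro fuel
  induction fuel with
  | zero => intro l cur acc h; omega
  | succ fuel ih =>
    intro l cur acc h
    cases l with
    | nil =>
      rw [PySem.Chars.splitOn.go]
      simp [List.modifyHead]
      omega
    | cons c t =>
      rw [PySem.Chars.splitOn.go]
      by_cases hc : c = a
      · have hpre : [a].isPrefixOf (c :: t) = true := by simp [List.isPrefixOf, hc]
        rw [if_pos hpre]
        have := ih t [] (cur.reverse :: acc) (by simpa using Nat.lt_of_succ_lt_succ h)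
        rw [List.length_cons] at *
        simp only [List.length_cons, List.length_nil, List.drop_succ_cons, List.drop_zero] at *
        rw [this]
        rcases hsp : t.splitOnP (fun c => c == a) with _ | ⟨u, uu⟩
        · exact absurd hsp (List.splitOnP_ne_nil _ t)
        · simp [List.splitOnP_cons, hc, hsp, List.modifyHead]
      · have hpre : ¬ ([a].isPrefixOf (c :: t) = true) := by
          simp [List.isPrefixOf]
          exact fun hca => hc hca.symm
        rw [if_neg hpre]
        have := ih t (c :: cur) acc (by simpa using Nat.lt_of_succ_lt_succ h)
        rw [this]
        rcases hsp : t.splitOnP (fun c => c == a) with _ | ⟨u, uu⟩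
        · exact absurd hsp (List.splitOnP_ne_nil _ t)
        · simp [List.splitOnP_cons, hc, hsp, List.modifyHead]

theorem pv_splitOn_single (a : Char) (cs : List Char) :
    PySem.Chars.splitOn cs [a] = cs.splitOnP (fun c => c == a) := by
  have h0 : PySem.Chars.splitOn cs [a]
      = PySem.Chars.splitOn.go [a] (cs.length + 1) cs [] [] := rfl
  rw [h0, pv_splitOn_go_single a (cs.length + 1) cs [] [] (by omega)]
  rcases hsp : cs.splitOnP (fun c => c == a) with _ | ⟨u, uu⟩
  · exact absurd hsp (List.splitOnP_ne_nil _ cs)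
  · simp [List.modifyHead]

-- ---- predicate bookkeeping ----
theorem pv_pred_comma : (fun c => pvRep c == ',') = pvIsC := by
  funext c
  rw [Bool.eq_iff_iff]
  simp only [pvRep, pvIsC, Bool.or_eq_true, beq_iff_eq]
  split
  · rename_i hif
    constructor
    · intro _; tauto
    · intro _; rfl
  · rename_i hif
    tauto

theorem pv_delim_or : pvIsDelim = (fun c => pvIsC c || pvIsNL c) := by
  funext c
  rw [Bool.eq_iff_iff]
  simp only [pvIsDelim, pvIsC, pvIsNL, Bool.or_eq_true, beq_iff_eq]
  tauto

theorem pv_rep_comp :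
    ∀ c, (if (if c == ';' then ',' else c) == '|' then ',' else (if c == ';' then ',' else c))
      = pvRep c := by
  intro c
  simp only [pvRep]
  by_cases h1 : c = ';'
  · simp [h1]
  · by_cases h2 : c = '|'
    · simp [h1, h2]
    · simp [h1, h2]

theorem pv_rep_id (c : Char) (h : pvIsC c = false) : pvRep c = c := by
  simp only [pvIsC, Bool.or_eq_false_iff, beq_eq_false_iff_ne] at h
  simp [pvRep, h.1.2, h.2]

theorem pv_tokens_empty_of_strip_nil (p : Char → Bool) (cs : List Char)
    (h : PySem.Chars.strip cs = []) : pvToks p cs = [] := by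
  rw [← pv_toks_strip, h]
  rfl

-- B's scan computes pvTokens pvIsDelim
theorem pv_b_fold :
    ∀ (cs : List Char) (names : List String) (cur : List Char),
      (∀ c ∈ cur, pvIsDelim c = false) →
      (let st := cs.foldl
          (fun (st : List String × List Char) ch =>
            if pvIsDelim ch then (pvFlush st.1 st.2, []) else (st.1, st.2 ++ [ch]))
          (names, cur)
       pvFlush st.1 st.2) = names ++ pvTokens pvIsDelim (cur ++ cs) := by
  intro cs
  induction cs with
  | nil =>
    intro names cur hcur
    simp only [List.foldl_nil, List.append_nil]
    rw [pvTokens, pvToks, pv_splitOnP_nodelim pvIsDelim cur hcur]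
    simp only [pvFlush, List.map_cons, List.map_nil, List.filter]
    by_cases h : (PySem.Chars.strip cur).isEmpty
    · simp [h]
    · simp [h]
  | cons c rest ih =>
    intro names cur hcur
    by_cases hc : pvIsDelim c
    · simp only [List.foldl_cons, if_pos hc]
      have hright : pvTokens pvIsDelim (cur ++ c :: rest)
          = (if (PySem.Chars.strip cur).isEmpty then []
             else [String.ofList (PySem.Chars.strip cur)]) ++ pvTokens pvIsDelim rest := by
        rw [pvTokens, pvToks, pv_splitOnP_delim_cons pvIsDelim cur rest c hcur hc]
        by_cases hst : (PySem.Chars.strip cur).isEmpty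
        · simp [hst, pvTokens, pvToks, List.filter_cons]
        · simp [hst, pvTokens, pvToks, List.filter_cons]
      have hih := ih (pvFlush names cur) [] (by simp)
      simp only [List.nil_append] at hih
      rw [hih, hright, pvFlush]
      by_cases hst : (PySem.Chars.strip cur).isEmpty
      · simp [hst]
      · simp [hst]
    · simp only [List.foldl_cons, if_neg hc]
      have hcur' : ∀ x ∈ cur ++ [c], pvIsDelim x = false := by
        intro x hx
        rcases List.mem_append.mp hx with hx | hx
        · exact hcur x hx
        · simp at hx; subst hx; simpa using hc
      rw [ih names (cur ++ [c]) hcur']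
      simp

theorem pv_outer_fold (F : List String → List Char → List String) (P : List (List Char))
    (hP : ∀ part ∈ P, ∀ ns : List String, F ns part = ns ++ pvTokens pvIsNL part) :
    ∀ names : List String,
      P.foldl F names = names ++ P.flatMap (fun s => pvTokens pvIsNL s) := by
  induction P with
  | nil => intro names; simp
  | cons x xs ih =>
    intro names
    rw [List.foldl_cons, hP x (by simp) names,
      ih (fun part hp => hP part (by simp [hp])) (names ++ pvTokens pvIsNL x)]
    simp

theorem pv_flat (P : List (List Char)) :
    (((P.flatMap (fun s => s.splitOnP pvIsNL)).map PySem.Chars.strip).filter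
        (fun t => !t.isEmpty)).map String.ofList
      = P.flatMap (fun s => pvTokens pvIsNL s) := by
  induction P with
  | nil => simp
  | cons x xs ih =>
    simp only [List.flatMap_cons, List.map_append, List.filter_append]
    rw [← ih]
    simp [pvTokens, pvToks]

theorem pv_A_eq (text : String) (hdom : ∀ c ∈ text.toList, pvDomChar c = true) :
    parse_variable_sources_text_py text = pvTokens pvIsDelim text.toList := by
  unfold parse_variable_sources_text_py
  have hrep : PySem.Chars.replace (PySem.Chars.replace text.toList [';'] [',']) ['|'] [',']
      = text.toList.map pvRep := by
    rw [pv_replace_single, pv_replace_single, List.map_map]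
    exact List.map_congr_left (fun c _ => pv_rep_comp c)
  rw [hrep]
  have hsplit : PySem.Chars.splitOn (text.toList.map pvRep) [',']
      = (text.toList.splitOnP pvIsC).map (List.map pvRep) := by
    rw [pv_splitOn_single, pv_splitOnP_map]
    simp only [pv_pred_comma]
  have hpieces : (text.toList.splitOnP pvIsC).map (List.map pvRep)
      = text.toList.splitOnP pvIsC := by
    have h1 : ∀ s ∈ text.toList.splitOnP pvIsC, s.map pvRep = id s := by
      intro s hs
      have h2 : ∀ c ∈ s, pvRep c = c := fun c hc =>
        pv_rep_id c ((pv_mem_splitOnP pvIsC text.toList s hs c hc).1)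
      simpa using List.map_congr_left (g := id) (fun c hc => h2 c hc)
    rw [List.map_congr_left h1, List.map_id]
  rw [hsplit, hpieces]
  rw [pv_outer_fold _ (text.toList.splitOnP pvIsC) ?hstep []]
  case hstep =>
    intro part hp ns
    have hdp : ∀ c ∈ part, pvDomChar c = true := fun c hc =>
      hdom c ((pv_mem_splitOnP pvIsC text.toList part hp c hc).2)
    by_cases hch : (PySem.Chars.strip part).isEmpty
    · simp only [hch, if_true]
      have h0 : pvToks pvIsNL part = [] :=
        pv_tokens_empty_of_strip_nil pvIsNL part (by simpa using hch)
      simp [pvTokens, h0]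
    · simp only [hch, if_false, Bool.false_eq_true]
      rw [pv_splitlines_eq, pv_inner_fold]
      have hb : ∀ c ∈ PySem.Chars.strip part, pvIsB c = pvIsNL c := fun c hc =>
        pv_isB_dom c (hdp c (pv_mem_strip c part hc))
      rw [pv_lines_toks pvIsB (PySem.Chars.strip part).length (PySem.Chars.strip part) [] le_rfl hb (by simp)]
      simp only [List.nil_append]
      rw [pvTokens, pv_toks_strip]
  rw [List.nil_append]
  -- glue the two split levels together
  rw [pvTokens, pvToks, pv_delim_or, pv_splitOnP_or pvIsC pvIsNL, pv_flat]

theorem pv_B_eq (text : String) :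
    parse_variable_sources_text_py_alt text = pvTokens pvIsDelim text.toList := by
  unfold parse_variable_sources_text_py_alt
  have := pv_b_fold text.toList [] [] (by simp)
  simpa using this

-- ===== VERDICT (by name: the statement is the Claim_ definition above) =====
theorem parse_variable_sources_text_py_spec : Claim_equal_parse_variable_sources_text_py := by
  intro text hdom
  have hdom' : ∀ c ∈ text.toList, pvDomChar c = true := by
    simpa [Dom_parse_variable_sources_text_py, pvDomStr, List.all_eq_true] using hdom
  show parse_variable_sources_text_py text = parse_variable_sources_text_py_alt text
  rw [pv_A_eq text hdom', pv_B_eq text]
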